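-- pv_equiv track=rewrite | github.com/InsideZhou/inside-utils | python/turing/alternating_subsequence.py | alt_subsequence_best_dp
-- ===== SOURCE A (Python) =====
-- from typing import List
--
-- def alt_subsequence_best_dp(nums: List[int]) -> int:
--     if 0 == len(nums):
--         return 0
--
--     result, accumulated, prev = 1, 1, nums[0]
--     for n in nums[1:]:
--         if n != prev:
--             accumulated += 1
--         else:
--             result = max(result, accumulated)
--             accumulated = 1
--
--         prev = n
--
--     return max(result, accumulated)
-- ===== SOURCE B (Python) =====
-- def alt_subsequence_best_dp(nums):
--     n = len(nums)
--     breaks = [i + 1 for i, (x, y) in enumerate(zip(nums, nums[1:])) if x == y]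
--     boundaries = [0] + breaks + [n]
--     best = 0
--     for lo, hi in zip(boundaries, boundaries[1:]):
--         best = max(best, hi - lo)
--     return best
-- ===== Notes on version B (the rewrite author's own statement) =====
-- stated objective: alternative
-- what changed: Replaces A's stateful accumulator-and-reset loop with a two-phase computation: first collect the break indices (where adjacent elements are equal), then take the maximum gap between consecutive boundary points (0, the breaks, len(nums)); the empty case falls out without a special branch.
import Mathlib
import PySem

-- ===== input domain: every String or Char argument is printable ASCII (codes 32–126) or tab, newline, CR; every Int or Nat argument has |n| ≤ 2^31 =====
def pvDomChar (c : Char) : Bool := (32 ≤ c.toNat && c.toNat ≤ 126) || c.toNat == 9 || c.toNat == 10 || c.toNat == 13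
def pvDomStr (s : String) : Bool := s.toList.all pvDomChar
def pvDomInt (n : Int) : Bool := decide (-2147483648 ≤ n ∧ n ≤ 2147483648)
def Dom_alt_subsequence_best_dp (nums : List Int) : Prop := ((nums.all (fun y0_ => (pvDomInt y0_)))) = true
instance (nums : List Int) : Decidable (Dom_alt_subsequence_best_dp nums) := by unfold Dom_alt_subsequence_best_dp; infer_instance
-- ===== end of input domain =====

-- B replaces A's stateful accumulator-and-reset loop by a two-phase break-points/boundary-gaps computation (alternative decomposition, same cost).

-- ===== PORT A =====
def alt_subsequence_best_dp (nums : List Int) : Int :=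
  if PySem.List.len nums = 0 then 0
  else
    -- nums[0]: in range because the length-0 case returned above (pyGetD exact here)
    let prev0 : Int := PySem.List.pyGetD nums 0 0
    let s := (PySem.List.slice nums (some 1) none).foldl
      (fun (st : Int × Int × Int) n =>
        if n ≠ st.2.2 then (st.1, st.2.1 + 1, n)
        else (max st.1 st.2.1, 1, n)) (1, 1, prev0)
    max s.1 s.2.1

-- ===== PORT B =====
def alt_subsequence_best_dp_alt (nums : List Int) : Int :=
  let n : Int := PySem.List.len nums
  let breaks : List Int :=
    (PySem.List.enumerate (nums.zip (PySem.List.slice nums (some 1) none)) 0).filterMap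
      (fun p => if p.2.1 = p.2.2 then some (p.1 + 1) else none)
  let boundaries : List Int := 0 :: (breaks ++ [n])
  (boundaries.zip (PySem.List.slice boundaries (some 1) none)).foldl
    (fun best p => max best (p.2 - p.1)) 0

-- ===== PRECONDITION & SPEC =====
def Spec_alt_subsequence_best_dp (nums : List Int) (out : Int) : Prop := out = alt_subsequence_best_dp_alt nums
instance (nums : List Int) (out : Int) : Decidable (Spec_alt_subsequence_best_dp nums out) := by unfold Spec_alt_subsequence_best_dp; infer_instance

-- ===== CLAIM (what is proved, stated in full; the proofs are below) =====
def Claim_equal_alt_subsequence_best_dp : Prop := ∀ (nums : List Int), Dom_alt_subsequence_best_dp nums → Spec_alt_subsequence_best_dp nums (alt_subsequence_best_dp nums)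

-- ===== LEMMAS AND PROOFS =====

-- run lengths of (p :: t) where the current run already has length a
def pvRL : Int → Int → List Int → List Int
  | _, a, [] => [a]
  | p, a, n :: t => if n ≠ p then pvRL n (a+1) t else a :: pvRL n 1 t

-- B's max-of-gaps loop over boundaries prev :: bs ++ [last], abstracted
def pvF : Int → Int → List Int → Int → Int
  | prev, acc, [], last => max acc (last - prev)
  | prev, acc, x :: xs, last => pvF x (max acc (x - prev)) xs last

-- B's break-point comprehension with enumerate start s
def pvBK (s : Int) (l : List (Int × Int)) : List Int :=
  (PySem.List.enumerate l s).filterMap (fun p => if p.2.1 = p.2.2 then some (p.1 + 1) else none)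

-- A's loop body, named
def pvStep : Int × Int × Int → Int → Int × Int × Int :=
  fun st n => if n ≠ st.2.2 then (st.1, st.2.1 + 1, n) else (max st.1 st.2.1, 1, n)

theorem pvStep_eq :
    (fun (st : Int × Int × Int) n =>
      if n ≠ st.2.2 then (st.1, st.2.1 + 1, n) else (max st.1 st.2.1, 1, n)) = pvStep := rfl

theorem pvBK_nil (s : Int) : pvBK s [] = [] := rfl

theorem pvBK_cons (s x y : Int) (l : List (Int × Int)) :
    pvBK s ((x, y) :: l) = if x = y then (s + 1) :: pvBK (s + 1) l else pvBK (s + 1) l := by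
  by_cases h : x = y <;> simp [pvBK, PySem.List.enumerate_cons, h]

-- A's loop equals a fold of max over the run lengths
theorem pvA_fold (t : List Int) : ∀ (r a p : Int),
    max (List.foldl pvStep (r, a, p) t).1 (List.foldl pvStep (r, a, p) t).2.1
      = (pvRL p a t).foldl max r := by
  induction t with
  | nil => intro r a p; simp [pvRL]
  | cons n t ih =>
    intro r a p
    by_cases h : n = p
    · rw [List.foldl_cons, show pvStep (r, a, p) n = (max r a, 1, n) from by simp [pvStep, h]]
      rw [show pvRL p a (n :: t) = a :: pvRL n 1 t from by simp [pvRL, h], List.foldl_cons]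
      exact ih (max r a) 1 n
    · rw [List.foldl_cons, show pvStep (r, a, p) n = (r, a + 1, n) from by simp [pvStep, h]]
      rw [show pvRL p a (n :: t) = pvRL n (a + 1) t from by simp [pvRL, h]]
      exact ih r (a + 1) n

-- the zip-fold of B is pvF
theorem pvZipF (bs : List Int) : ∀ (prev acc last : Int),
    (((prev :: (bs ++ [last])).zip (bs ++ [last])).foldl
      (fun best p => max best (p.2 - p.1)) acc) = pvF prev acc bs last := by
  induction bs with
  | nil => intro prev acc last; simp [pvF]
  | cons x xs ih =>
    intro prev acc last
    simpa [pvF] using ih x (max acc (x - prev)) last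

-- main invariant: pvF over the shifted break points equals fold of max over run lengths
theorem pvMain (t : List Int) : ∀ (p a prev acc : Int),
    pvF prev acc (pvBK (prev + a) ((p :: t).zip t)) ((t.length : Int) + 1 + prev + a)
      = (pvRL p (a + 1) t).foldl max acc := by
  induction t with
  | nil =>
    intro p a prev acc
    simp only [List.zip_nil_right, pvBK_nil, pvF, pvRL, List.foldl_cons, List.foldl_nil,
      List.length_nil, Nat.cast_zero]
    ring_nf
  | cons n t ih =>
    intro p a prev acc
    rw [List.zip_cons_cons]
    by_cases h : p = n
    · rw [pvBK_cons, if_pos h, pvF]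
      have key := ih n 0 (prev + a + 1) (max acc (a + 1))
      simp only [add_zero, zero_add] at key
      rw [show (prev + a + 1 - prev : Int) = a + 1 from by ring,
          show (((n :: t).length : Int) + 1 + prev + a) = (t.length : Int) + 1 + (prev + a + 1)
            from by simp only [List.length_cons]; push_cast; ring,
          key]
      have hr : pvRL p (a + 1) (n :: t) = (a + 1) :: pvRL n 1 t := by simp [pvRL, h]
      rw [hr, List.foldl_cons]
    · rw [pvBK_cons, if_neg h]
      have key := ih n (a + 1) prev acc
      rw [show (prev + a + 1 : Int) = prev + (a + 1) from by ring,
          show (((n :: t).length : Int) + 1 + prev + a) = (t.length : Int) + 1 + prev + (a + 1)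
            from by simp only [List.length_cons]; push_cast; ring,
          key]
      have hr : pvRL p (a + 1) (n :: t) = pvRL n (a + 1 + 1) t := by
        simp only [pvRL, if_pos (show n ≠ p from fun e => h e.symm)]
      rw [hr]

-- seed shuffle for fold of max
theorem pvFoldMaxInit (l : List Int) : ∀ (b c : Int), l.foldl max (max b c) = max b (l.foldl max c) := by
  induction l with
  | nil => intro b c; rfl
  | cons h t ih =>
    intro b c
    simp only [List.foldl_cons, max_assoc, ih]

theorem pvFoldMaxOne (l : List Int) : l.foldl max 1 = max 1 (l.foldl max 0) := by
  simpa using pvFoldMaxInit l 1 0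

-- every pvRL list contains an element ≥ its starting accumulator
theorem pvRL_exists (t : List Int) : ∀ (p a : Int), ∃ x ∈ pvRL p a t, a ≤ x := by
  induction t with
  | nil => intro p a; exact ⟨a, by simp [pvRL]⟩
  | cons n t ih =>
    intro p a
    by_cases h : n = p
    · exact ⟨a, by simp [pvRL, h]⟩
    · obtain ⟨x, hx, hax⟩ := ih n (a + 1)
      exact ⟨x, by simp [pvRL, h, hx], by omega⟩

theorem pvB_eq (nums : List Int) :
    alt_subsequence_best_dp_alt nums =
      match nums with
      | [] => 0
      | h :: t => (pvRL h 1 t).foldl max 0 := by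
  match nums with
  | [] => rfl
  | h :: t =>
    show (let boundaries : List Int := 0 :: (pvBK 0 ((h :: t).zip (PySem.List.slice (h :: t) (some 1) none)) ++ [PySem.List.len (h :: t)]);
      (boundaries.zip (PySem.List.slice boundaries (some 1) none)).foldl (fun best p => max best (p.2 - p.1)) 0) = _
    simp only [PySem.List.slice_from_one, PySem.List.len_eq, List.tail_cons, List.length_cons]
    rw [pvZipF]
    have key := pvMain t h 0 0 0
    simp only [add_zero, zero_add] at key
    push_cast
    exact key

-- ===== VERDICT (by name: the statement is the Claim_ definition above) =====
theorem alt_subsequence_best_dp_spec : Claim_equal_alt_subsequence_best_dp := by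
  intro nums _
  show alt_subsequence_best_dp nums = alt_subsequence_best_dp_alt nums
  rw [pvB_eq]
  match nums with
  | [] => rfl
  | h :: t =>
    show (if PySem.List.len (h :: t) = 0 then (0:Int) else _) = _
    rw [if_neg (by simp [PySem.List.len_eq]; omega)]
    simp only [PySem.List.pyGetD_zero_cons, PySem.List.slice_from_one, List.tail_cons]
    rw [pvStep_eq, pvA_fold t 1 1 h, pvFoldMaxOne]
    obtain ⟨x, hx, h1x⟩ := pvRL_exists t h 1
    have := (PySem.List.le_foldl_max (pvRL h 1 t) 0).2 x hx
    omega
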